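-- pv_equiv track=rewrite | github.com/gabriellippiatt/University | CSSE4011/csse4011_repo/apps/prac2/2b/p2.py | untilcom
-- ===== SOURCE A (Python) =====
-- def untilcom(st,dict):
--     val = ""
--     counter = 1
--     for i in range(0,len(st)):
--         if counter > 14:
--             break
--         if st[i] != ',' and st[i] != '\n' and st[i] != '\r':
--             val += st[i]
--         else:
--             dict[counter].append((val))
--             val = ""
--             counter += 1
--     return dict
-- ===== SOURCE B (Python) =====
-- def untilcom(st, dict):
--     fields = st.replace('\r', ',').replace('\n', ',').split(',')
--     for i, f in enumerate(fields[:min(14, len(fields) - 1)]):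
--         dict[i + 1].append(f)
--     return dict
-- ===== Notes on version B (the rewrite author's own statement) =====
-- stated objective: idiomatic
-- what changed: A scans the string character by character, growing a running accumulator and mutating the dict mid-scan with a counter and an early break; B computes the whole field list up front with built-in replace/split and then runs one bounded append loop over fields[:min(14, len(fields)-1)].
import Mathlib
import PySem

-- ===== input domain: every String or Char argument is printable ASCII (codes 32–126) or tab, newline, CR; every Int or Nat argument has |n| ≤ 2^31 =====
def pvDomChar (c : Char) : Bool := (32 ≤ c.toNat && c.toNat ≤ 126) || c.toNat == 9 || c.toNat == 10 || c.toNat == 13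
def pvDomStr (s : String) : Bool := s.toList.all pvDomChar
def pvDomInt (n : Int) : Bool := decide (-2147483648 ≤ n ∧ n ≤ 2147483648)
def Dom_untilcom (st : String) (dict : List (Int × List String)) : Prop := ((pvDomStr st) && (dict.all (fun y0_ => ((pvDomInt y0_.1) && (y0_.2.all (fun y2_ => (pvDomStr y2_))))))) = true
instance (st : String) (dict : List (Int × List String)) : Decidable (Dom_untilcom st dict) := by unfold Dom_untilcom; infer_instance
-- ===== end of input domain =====

-- B replaces A's char-by-char scan with built-in replace/split plus one append loop (idiomatic);
-- both A and B mutate `dict` in place in Python (identically); the equivalence proved here is about the returned value.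

-- ===== PORT A =====
-- dict[k].append(s): update the first entry with key k (no-op where Python would raise KeyError; Pre_ excludes that)
def pvModifyKey : List (Int × List String) → Int → String → List (Int × List String)
  | [], _, _ => []
  | (k, v) :: rest, key, s =>
      if k = key then (k, v ++ [s]) :: rest else (k, v) :: pvModifyKey rest key s

def untilcomLoop : List Char → List Char → Int → List (Int × List String) → List (Int × List String)
  | [], _, _, d => d
  | c :: rest, val, counter, d =>
      if counter > 14 then d
      else if c ≠ ',' ∧ c ≠ '\n' ∧ c ≠ '\r' then
        untilcomLoop rest (val ++ [c]) counter d
      else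
        untilcomLoop rest [] (counter + 1) (pvModifyKey d counter (String.ofList val))

def untilcom (st : String) (dict : List (Int × List String)) : List (Int × List String) :=
  untilcomLoop st.toList [] 1 dict

-- ===== PORT B =====
def untilcom_alt (st : String) (dict : List (Int × List String)) : List (Int × List String) :=
  let fields := PySem.Chars.splitOn
    (PySem.Chars.replace (PySem.Chars.replace st.toList ['\r'] [',']) ['\n'] [',']) [',']
  (PySem.List.enumerate (fields.take (min 14 (fields.length - 1)))).foldl
    (fun d p => pvModifyKey d (p.1 + 1) (String.ofList p.2)) dict

-- ===== PRECONDITION & SPEC =====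
-- Pre_ excludes exactly the inputs where Python raises KeyError: a key in 1..(number of appended
-- fields) missing from dict; both A and B raise there.
def Pre_untilcom (st : String) (dict : List (Int × List String)) : Prop :=
  ∀ k ∈ List.range (min 14 (st.toList.countP (fun c => c == ',' || c == '\n' || c == '\r'))),
    ((k : Int) + 1) ∈ dict.map Prod.fst
instance (st : String) (dict : List (Int × List String)) : Decidable (Pre_untilcom st dict) := by
  unfold Pre_untilcom; infer_instance

def pvWitness_untilcom : String × (List (Int × List String)) := ("ab,cd\ne", [(1, []), (2, ["x"])])

def Spec_untilcom (st : String) (dict : List (Int × List String)) (out : List (Int × List String)) : Prop := out = untilcom_alt st dict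
instance (st : String) (dict : List (Int × List String)) (out : List (Int × List String)) : Decidable (Spec_untilcom st dict out) := by unfold Spec_untilcom; infer_instance

-- ===== CLAIM (what is proved, stated in full; the proofs are below) =====
def Claim_equal_untilcom : Prop := ∀ (st : String) (dict : List (Int × List String)), Dom_untilcom st dict → Pre_untilcom st dict → Spec_untilcom st dict (untilcom st dict)

-- ===== LEMMAS AND PROOFS =====

def pvIsDelim (c : Char) : Bool := c == ',' || c == '\n' || c == '\r'

-- split a char list on the delimiter predicate, empty fields preserved, one trailing field
def pvSplit : List Char → List (List Char)
  | [] => [[]]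
  | c :: rest => if pvIsDelim c then [] :: pvSplit rest else (pvSplit rest).modifyHead (c :: ·)

def pvSplitC (a : Char) : List Char → List (List Char)
  | [] => [[]]
  | c :: rest => if c = a then [] :: pvSplitC a rest else (pvSplitC a rest).modifyHead (c :: ·)

theorem pvSplit_ne_nil (cs : List Char) : pvSplit cs ≠ [] := by
  induction cs with
  | nil => simp [pvSplit]
  | cons c rest ih =>
      simp only [pvSplit]
      split
      · simp
      · cases h : pvSplit rest with
        | nil => exact absurd h ih
        | cons f fs => simp [List.modifyHead]

theorem pvSplitC_ne_nil (a : Char) (cs : List Char) : pvSplitC a cs ≠ [] := by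
  induction cs with
  | nil => simp [pvSplitC]
  | cons c rest ih =>
      simp only [pvSplitC]
      split
      · simp
      · cases h : pvSplitC a rest with
        | nil => exact absurd h ih
        | cons f fs => simp [List.modifyHead]

-- append fields to consecutive keys starting at k
def pvAppRun : List (Int × List String) → Int → List (List Char) → List (Int × List String)
  | d, _, [] => d
  | d, k, f :: fs => pvAppRun (pvModifyKey d k (String.ofList f)) (k + 1) fs

theorem untilcomLoop_eq (cs : List Char) : ∀ (val : List Char) (counter : Int) (d : List (Int × List String)),
    untilcomLoop cs val counter d
      = pvAppRun d counter ((((pvSplit cs).modifyHead (val ++ ·)).dropLast).take (15 - counter).toNat) := by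
  induction cs with
  | nil =>
      intro val counter d
      simp [untilcomLoop, pvSplit, pvAppRun, List.modifyHead]
  | cons c rest ih =>
      intro val counter d
      by_cases hc : counter > 14
      · have h0 : (15 - counter).toNat = 0 := by omega
        simp [untilcomLoop, hc, h0, pvAppRun]
      · obtain ⟨f, fs, hf⟩ : ∃ f fs, pvSplit rest = f :: fs := by
          cases h : pvSplit rest with
          | nil => exact absurd h (pvSplit_ne_nil rest)
          | cons f fs => exact ⟨f, fs, rfl⟩
        by_cases hd : pvIsDelim c
        · have hbranch : ¬ (c ≠ ',' ∧ c ≠ '\n' ∧ c ≠ '\r') := by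
            simp [pvIsDelim] at hd; tauto
          have hstep : (15 - counter).toNat = (15 - (counter + 1)).toNat + 1 := by omega
          simp only [untilcomLoop, if_neg hc, if_neg hbranch, ih]
          simp only [pvSplit, if_pos hd, hf, List.modifyHead, List.append_nil, List.nil_append,
            List.dropLast_cons_of_ne_nil (List.cons_ne_nil f fs), hstep, List.take_succ_cons, pvAppRun]
        · have hbranch : (c ≠ ',' ∧ c ≠ '\n' ∧ c ≠ '\r') := by
            simp [pvIsDelim] at hd; tauto
          simp only [untilcomLoop, if_neg hc, if_pos hbranch, ih, pvSplit, hf]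
          simp [hd, List.modifyHead]

theorem enumerate_foldl_eq (L : List (List Char)) : ∀ (s : Int) (d : List (Int × List String)),
    (PySem.List.enumerate L s).foldl (fun d p => pvModifyKey d (p.1 + 1) (String.ofList p.2)) d
      = pvAppRun d (s + 1) L := by
  induction L with
  | nil => intro s d; simp [PySem.List.enumerate, pvAppRun]
  | cons f fs ih =>
      intro s d
      simp only [PySem.List.enumerate, List.foldl_cons, pvAppRun, ih]

theorem replace_go_single (a b : Char) : ∀ (l : List Char) (fuel : Nat) (acc : List Char), l.length ≤ fuel →
    PySem.Chars.replace.go [a] [b] fuel l acc = acc.reverse ++ l.map (fun c => if c = a then b else c) := by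
  intro l
  induction l with
  | nil => intro fuel acc _; cases fuel <;> simp [PySem.Chars.replace.go]
  | cons c t ih =>
      intro fuel acc h
      simp only [List.length_cons] at h
      cases fuel with
      | zero => omega
      | succ n =>
          rw [PySem.Chars.replace.go]
          by_cases hca : c = a
          · subst hca
            rw [if_pos (by simp [List.isPrefixOf])]
            simpa using ih n (b :: acc) (by omega)
          · rw [if_neg (by simp [List.isPrefixOf]; exact fun h => hca h.symm)]
            simpa [hca] using ih n (c :: acc) (by omega)

theorem replace_single (cs : List Char) (a b : Char) :
    PySem.Chars.replace cs [a] [b] = cs.map (fun c => if c = a then b else c) := by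
  rw [PySem.Chars.replace]
  simp only [List.isEmpty_cons, Bool.false_eq_true, if_false]
  rw [replace_go_single a b cs cs.length [] le_rfl]
  simp

theorem splitOn_go_single (a : Char) : ∀ (l : List Char) (fuel : Nat) (cur : List Char) (acc : List (List Char)), l.length ≤ fuel →
    PySem.Chars.splitOn.go [a] fuel l cur acc
      = acc.reverse ++ (pvSplitC a l).modifyHead (cur.reverse ++ ·) := by
  intro l
  induction l with
  | nil => intro fuel cur acc _; cases fuel <;> simp [PySem.Chars.splitOn.go, pvSplitC, List.modifyHead]
  | cons c t ih =>
      intro fuel cur acc h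
      simp only [List.length_cons] at h
      cases fuel with
      | zero => omega
      | succ n =>
          rw [PySem.Chars.splitOn.go]
          by_cases hca : c = a
          · subst hca
            rw [if_pos (by simp [List.isPrefixOf])]
            simp only [show ([c] : List Char).length = 1 from rfl, List.drop_succ_cons, List.drop_zero]
            rw [ih n [] (cur.reverse :: acc) (by omega)]
            simp only [pvSplitC, List.modifyHead, List.reverse_cons, List.reverse_nil,
              List.nil_append, List.append_assoc, List.cons_append, List.nil_append]
            cases pvSplitC c t <;> simp
          · rw [if_neg (by simp [List.isPrefixOf]; exact fun h => hca h.symm)]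
            rw [ih n (c :: cur) acc (by omega)]
            rw [pvSplitC, if_neg hca]
            obtain ⟨f, fs, hf⟩ : ∃ f fs, pvSplitC a t = f :: fs := by
              cases h2 : pvSplitC a t with
              | nil => exact absurd h2 (pvSplitC_ne_nil a t)
              | cons f fs => exact ⟨f, fs, rfl⟩
            rw [hf]
            simp [List.modifyHead]

theorem splitOn_single (cs : List Char) (a : Char) :
    PySem.Chars.splitOn cs [a] = pvSplitC a cs := by
  rw [PySem.Chars.splitOn, splitOn_go_single a cs (cs.length + 1) [] [] (by omega)]
  cases h : pvSplitC a cs <;> simp [List.modifyHead]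

def pvSubst (c : Char) : Char :=
  if (if c = '\r' then ',' else c) = '\n' then ',' else (if c = '\r' then ',' else c)

theorem pvSplitC_map (cs : List Char) :
    pvSplitC ',' (cs.map pvSubst) = pvSplit cs := by
  induction cs with
  | nil => rfl
  | cons c rest ih =>
      by_cases h1 : c = ',' <;> by_cases h2 : c = '\n' <;> by_cases h3 : c = '\r' <;>
        simp [pvSubst, pvIsDelim, pvSplitC, pvSplit, h1, h2, h3, ih]

-- ===== VERDICT (by name: the statement is the Claim_ definition above) =====
theorem untilcom_spec : Claim_equal_untilcom := by
  intro st dict _ _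
  unfold Spec_untilcom untilcom untilcom_alt
  rw [untilcomLoop_eq]
  rw [replace_single, replace_single, List.map_map]
  rw [show ((fun c => if c = '\n' then ',' else c) ∘ (fun c => if c = '\r' then ',' else c)) = pvSubst from rfl]
  rw [splitOn_single, pvSplitC_map]
  rw [enumerate_foldl_eq]
  congr 1
  rw [List.dropLast_eq_take, List.take_take]
  have h15 : ((15 : Int) - 1).toNat = 14 := by decide
  rw [h15]
  cases h : pvSplit st.toList with
  | nil => exact absurd h (pvSplit_ne_nil st.toList)
  | cons f fs => simp [List.modifyHead]
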